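-- pv_equiv track=rewrite | github.com/Kamran47t6/Data_Structure_And_Algorithm_LAB | Lab3/karatsuba.py.py | Multiply2
-- ===== SOURCE A (Python) =====
-- def Multiply2(x,y):
--     try:
--         if not all(bit in '01' for bit in x) or not all(bit in '01' for bit in y):
--             return ""
--         result=bin(int(x,2)* int(y,2))[2:]
--         return result
--     except ValueError:
--         return ""
-- ===== SOURCE B (Python) =====
-- def _add(u, v, c):
--     # binary addition of two LSB-first bit lists with carry c
--     res = []
--     i = 0
--     while i < len(u) or i < len(v) or c:
--         s = (u[i] if i < len(u) else 0) + (v[i] if i < len(v) else 0) + c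
--         res.append(s % 2)
--         c = s // 2
--         i += 1
--     return res
--
-- def Multiply2(x, y):
--     if any(c not in '01' for c in x) or any(c not in '01' for c in y):
--         return ""
--     if not x or not y:
--         return ""
--     a = [1 if c == '1' else 0 for c in reversed(x)]
--     acc = []
--     shift = 0
--     for c in reversed(y):
--         if c == '1':
--             acc = _add(acc, [0] * shift + a, 0)
--         shift += 1
--     while acc and acc[-1] == 0:
--         acc.pop()
--     if not acc:
--         acc = [0]
--     return ''.join('1' if b else '0' for b in reversed(acc))
-- ===== Notes on version B (the rewrite author's own statement) =====
-- stated objective: alternative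
-- what changed: B replaces int(x,2)*int(y,2)+bin() with bit-level shift-and-add long multiplication over LSB-first bit lists (binary ripple-carry addition of shifted copies), then formats the bit list back, stripping high zeros.
import Mathlib
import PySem

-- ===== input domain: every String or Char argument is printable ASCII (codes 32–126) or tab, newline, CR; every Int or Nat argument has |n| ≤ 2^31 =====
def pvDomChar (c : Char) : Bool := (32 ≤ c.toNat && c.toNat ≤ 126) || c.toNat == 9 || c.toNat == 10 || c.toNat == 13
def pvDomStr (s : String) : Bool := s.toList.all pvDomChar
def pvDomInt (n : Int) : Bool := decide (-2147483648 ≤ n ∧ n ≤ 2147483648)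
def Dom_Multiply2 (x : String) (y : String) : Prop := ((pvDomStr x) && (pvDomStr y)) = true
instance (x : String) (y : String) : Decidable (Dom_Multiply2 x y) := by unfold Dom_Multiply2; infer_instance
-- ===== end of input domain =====

-- B multiplies by bit-level shift-and-add over bit lists instead of int(x,2)*int(y,2); same results.

-- ===== PORT A =====
-- int(s, 2) on a validated nonempty '01' string: MSB-first Horner fold
def pvParseBin (l : List Char) : Nat :=
  l.foldl (fun a c => 2 * a + (if c == '1' then 1 else 0)) 0

-- bin(n)[2:] for n > 0 (MSB first)
def pvBinAux : Nat → List Char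
  | 0 => []
  | n+1 => pvBinAux ((n+1)/2) ++ [if (n+1) % 2 = 1 then '1' else '0']
decreasing_by omega

-- bin(n)[2:] for n ≥ 0 (bin(0)[2:] = "0")
def pvBinRepr (n : Nat) : List Char := if n = 0 then ['0'] else pvBinAux n

def Multiply2 (x : String) (y : String) : String :=
  if !((x.toList.all fun c => c == '0' || c == '1') && (y.toList.all fun c => c == '0' || c == '1')) then
    ""
  else if x.toList.isEmpty || y.toList.isEmpty then
    ""  -- int('', 2) raises ValueError, caught by the except
  else
    String.mk (pvBinRepr (pvParseBin x.toList * pvParseBin y.toList))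

-- ===== PORT B =====
def pvBit (c : Char) : Nat := if c == '1' then 1 else 0

-- _add: ripple-carry addition of two LSB-first bit lists
def pvAdd : List Nat → List Nat → Nat → List Nat
  | [], [], c => if c = 0 then [] else [c]
  | [], b :: v, c => (b + c) % 2 :: pvAdd [] v ((b + c) / 2)
  | a :: u, [], c => (a + c) % 2 :: pvAdd u [] ((a + c) / 2)
  | a :: u, b :: v, c => (a + b + c) % 2 :: pvAdd u v ((a + b + c) / 2)
termination_by u v _ => u.length + v.length

-- one step of the shift-and-add loop; state = (shift, acc)
def pvStep (a : List Nat) (st : Nat × List Nat) (c : Char) : Nat × List Nat :=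
  (st.1 + 1, if c == '1' then pvAdd st.2 (List.replicate st.1 0 ++ a) 0 else st.2)

def Multiply2_alt (x : String) (y : String) : String :=
  if (x.toList.any fun c => !(c == '0' || c == '1')) || (y.toList.any fun c => !(c == '0' || c == '1')) then
    ""
  else if x.toList.isEmpty || y.toList.isEmpty then
    ""
  else
    let a := x.toList.reverse.map pvBit
    let acc := (y.toList.reverse.foldl (pvStep a) (0, [])).2
    let s := (acc.reverse.dropWhile (fun b => b == 0)).reverse
    let s := if s = [] then [0] else s
    String.mk (s.reverse.map (fun b => if b ≠ 0 then '1' else '0'))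

-- ===== PRECONDITION & SPEC =====
def Spec_Multiply2 (x : String) (y : String) (out : String) : Prop := out = Multiply2_alt x y
instance (x : String) (y : String) (out : String) : Decidable (Spec_Multiply2 x y out) := by unfold Spec_Multiply2; infer_instance

-- ===== CLAIM (what is proved, stated in full; the proofs are below) =====
def Claim_equal_Multiply2 : Prop := ∀ (x : String) (y : String), Dom_Multiply2 x y → Spec_Multiply2 x y (Multiply2 x y)

-- ===== LEMMAS AND PROOFS =====

-- value of an LSB-first bit list
def pvVal : List Nat → Nat
  | [] => 0
  | b :: t => b + 2 * pvVal t

theorem pvVal_append (u v : List Nat) : pvVal (u ++ v) = pvVal u + 2 ^ u.length * pvVal v := by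
  induction u with
  | nil => simp [pvVal]
  | cons b t ih => simp [pvVal, ih, pow_succ]; ring

theorem pvVal_replicate (k : Nat) : pvVal (List.replicate k 0) = 0 := by
  induction k with
  | zero => rfl
  | succ n ih => simp [List.replicate, pvVal, ih]

theorem pvAdd_val (u v : List Nat) (c : Nat) : pvVal (pvAdd u v c) = pvVal u + pvVal v + c := by
  fun_induction pvAdd u v c
  all_goals simp_all [pvVal]
  all_goals omega

theorem pvAdd_le (u v : List Nat) (c : Nat)
    (hu : ∀ b ∈ u, b ≤ 1) (hv : ∀ b ∈ v, b ≤ 1) (hc : c ≤ 1) :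
    ∀ b ∈ pvAdd u v c, b ≤ 1 := by
  fun_induction pvAdd u v c
  case case1 => simp
  case case2 => simp; omega
  all_goals
    rename_i ih
    simp only [List.mem_cons, forall_eq_or_imp] at hu hv ⊢
    refine ⟨by omega, ?_⟩
    apply ih
    · first | exact hu.2 | exact hu
    · first | exact hv.2 | exact hv
    · omega

-- A's Horner parse equals the value of the reversed bit list
theorem pvParse_eq (l : List Char) (a : Nat) :
    List.foldl (fun a c => 2 * a + (if c == '1' then 1 else 0)) a l
      = a * 2 ^ l.length + pvVal (l.reverse.map pvBit) := by
  induction l generalizing a with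
  | nil => simp [pvVal]
  | cons c t ih =>
      simp only [List.foldl_cons, List.reverse_cons, List.map_append, List.map_cons,
        List.map_nil, List.length_cons, pvVal_append, ih]
      simp [pvVal, pvBit, pow_succ, List.length_reverse]
      split <;> ring

-- value invariant of the shift-and-add loop
theorem pvLoop_val (a : List Nat) (cs : List Char) (s : Nat) (acc : List Nat) :
    pvVal ((cs.foldl (pvStep a) (s, acc)).2)
      = pvVal acc + 2 ^ s * pvVal a * pvVal (cs.map pvBit) := by
  induction cs generalizing s acc with
  | nil => simp [pvVal]
  | cons c t ih =>
      simp only [List.foldl_cons, List.map_cons, pvStep, pvVal]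
      by_cases h : c == '1'
      · simp only [h, if_pos, pvBit]
        rw [ih, pvAdd_val, pvVal_append, pvVal_replicate]
        simp [pow_succ, List.length_replicate]
        ring
      · simp only [h, if_neg, Bool.false_eq_true, not_false_iff, pvBit]
        rw [ih]
        simp [pow_succ]
        ring

-- bit-size invariant of the shift-and-add loop
theorem pvLoop_le (a : List Nat) (ha : ∀ b ∈ a, b ≤ 1) (cs : List Char) (s : Nat)
    (acc : List Nat) (hacc : ∀ b ∈ acc, b ≤ 1) :
    ∀ b ∈ (cs.foldl (pvStep a) (s, acc)).2, b ≤ 1 := by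
  induction cs generalizing s acc with
  | nil => simpa using hacc
  | cons c t ih =>
      simp only [List.foldl_cons, pvStep]
      split
      · refine ih _ _ (pvAdd_le _ _ _ hacc ?_ (by omega))
        intro b hb
        rcases List.mem_append.mp hb with h | h
        · have := List.eq_of_mem_replicate h; omega
        · exact ha b h
      · exact ih _ _ hacc

-- dropping high zeros keeps the value
theorem pvStrip_val (r : List Nat) :
    pvVal ((r.dropWhile (fun b => b == 0)).reverse) = pvVal r.reverse := by
  induction r with
  | nil => rfl
  | cons b t ih =>
      by_cases h : b = 0
      · subst h
        simp only [List.dropWhile_cons, beq_self_eq_true, if_pos, List.reverse_cons, ih,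
          pvVal_append, pvVal]
        simp
      · simp [h]

theorem pvDrop_head_ne (r : List Nat) (b : Nat) (t : List Nat)
    (h : r.dropWhile (fun b => b == 0) = b :: t) : b ≠ 0 := by
  induction r with
  | nil => simp at h
  | cons a r ih =>
      by_cases ha : a = 0
      · subst ha; simp only [List.dropWhile_cons, beq_self_eq_true, if_pos] at h; exact ih h
      · rw [List.dropWhile_cons, if_neg (by simp [ha])] at h
        injection h with h1 _
        omega

theorem pvLast_pos (l : List Nat) (h : l ≠ []) (hl : l.getLast? ≠ some 0) : 1 ≤ pvVal l := by
  induction l with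
  | nil => simp at h
  | cons b t ih =>
      cases t with
      | nil =>
          simp only [List.getLast?_singleton, ne_eq, Option.some.injEq] at hl
          simp [pvVal]; omega
      | cons c t' =>
          have h1 : 1 ≤ pvVal (c :: t') := ih (by simp) (by rwa [List.getLast?_cons_cons] at hl)
          have hv : pvVal (b :: c :: t') = b + 2 * pvVal (c :: t') := rfl
          omega

theorem pvBinAux_eq (n : Nat) (h : n ≠ 0) :
    pvBinAux n = pvBinAux (n / 2) ++ [if n % 2 = 1 then '1' else '0'] := by
  obtain ⟨m, rfl⟩ := Nat.exists_eq_succ_of_ne_zero h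
  rw [pvBinAux]

-- canonical rendering: an LSB-first bit list with nonzero top bit renders as bin(its value)[2:]
theorem pvCanon (l : List Nat) (hle : ∀ b ∈ l, b ≤ 1) (hne : l ≠ [])
    (hlast : l.getLast? ≠ some 0) :
    l.reverse.map (fun b => if b ≠ 0 then '1' else '0') = pvBinAux (pvVal l) := by
  induction l with
  | nil => simp at hne
  | cons b t ih =>
      have hb : b ≤ 1 := hle b (by simp)
      cases t with
      | nil =>
          simp only [List.getLast?_singleton, ne_eq, Option.some.injEq] at hlast
          have : b = 1 := by omega
          subst this
          simp [pvVal, pvBinAux]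
      | cons c t' =>
          have ht : (1 : Nat) ≤ pvVal (c :: t') :=
            pvLast_pos _ (by simp) (by rwa [List.getLast?_cons_cons] at hlast)
          have hv : pvVal (b :: c :: t') = b + 2 * pvVal (c :: t') := rfl
          have hn : pvVal (b :: c :: t') ≠ 0 := by omega
          rw [pvBinAux_eq _ hn]
          have h2 : pvVal (b :: c :: t') / 2 = pvVal (c :: t') := by omega
          have h3 : pvVal (b :: c :: t') % 2 = b := by omega
          rw [h2, h3, ← ih (fun z hz => hle z (by simp [List.mem_cons] at hz ⊢; tauto))
            (by simp) (by rwa [List.getLast?_cons_cons] at hlast)]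
          simp only [List.reverse_cons, List.map_append, List.map_cons, List.map_nil]
          congr 1
          have hbc : b = 0 ∨ b = 1 := by omega
          rcases hbc with rfl | rfl <;> simp

-- ===== VERDICT (by name: the statement is the Claim_ definition above) =====
theorem Multiply2_spec : Claim_equal_Multiply2 := by
  intro x y _
  unfold Spec_Multiply2 Multiply2 Multiply2_alt
  have h1 : ∀ l : List Char, (l.any fun c => !(c == '0' || c == '1'))
      = !(l.all fun c => c == '0' || c == '1') := by
    intro l
    induction l with
    | nil => rfl
    | cons c t ih =>
        simp only [List.any_cons, List.all_cons, ih]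
        cases (c == '0' || c == '1') <;> simp
  have hval : ((x.toList.any fun c => !(c == '0' || c == '1'))
      || (y.toList.any fun c => !(c == '0' || c == '1')))
      = (!((x.toList.all fun c => c == '0' || c == '1')
          && (y.toList.all fun c => c == '0' || c == '1'))) := by
    rw [h1, h1]
    cases (x.toList.all fun c => c == '0' || c == '1') <;> simp
  rw [hval]
  by_cases hv : ((x.toList.all fun c => c == '0' || c == '1')
      && (y.toList.all fun c => c == '0' || c == '1')) = true
  swap
  · simp only [Bool.not_eq_true] at hv
    rw [hv]
    simp
  rw [hv]
  simp only [Bool.not_true, Bool.false_eq_true, if_false]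
  by_cases he : (x.toList.isEmpty || y.toList.isEmpty) = true
  · simp [he]
  · simp only [he, Bool.false_eq_true, if_false]
    -- main branch
    set a := x.toList.reverse.map pvBit with ha
    set acc := (y.toList.reverse.foldl (pvStep a) (0, [])).2 with hacc
    have hpx : pvParseBin x.toList = pvVal a := by
      unfold pvParseBin; rw [pvParse_eq]; simp [ha]
    have hpy : pvParseBin y.toList = pvVal (y.toList.reverse.map pvBit) := by
      unfold pvParseBin; rw [pvParse_eq]; simp
    have haccval : pvVal acc = pvVal a * pvVal (y.toList.reverse.map pvBit) := by
      rw [hacc, pvLoop_val]; simp [pvVal]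
    have hn : pvParseBin x.toList * pvParseBin y.toList = pvVal acc := by
      rw [hpx, hpy, haccval]
    have hbits : ∀ b ∈ acc, b ≤ 1 := by
      rw [hacc]
      refine pvLoop_le _ ?_ _ _ _ (by simp)
      intro b hb
      rw [ha] at hb
      simp only [List.mem_map] at hb
      obtain ⟨c, _, rfl⟩ := hb
      unfold pvBit; split <;> omega
    set s := (acc.reverse.dropWhile (fun b => b == 0)).reverse with hs
    have hsval : pvVal s = pvVal acc := by
      rw [hs, pvStrip_val, List.reverse_reverse]
    rw [hn, ← hsval]
    by_cases hse : s = []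
    · simp only [hse, if_pos]
      rfl
    · rw [if_neg hse]
      -- s ends with a nonzero bit
      obtain ⟨b, t, hbt⟩ : ∃ b t, acc.reverse.dropWhile (fun b => b == 0) = b :: t := by
        rcases hd : acc.reverse.dropWhile (fun b => b == 0) with _ | ⟨b, t⟩
        · exact absurd (by rw [hs, hd]; rfl) hse
        · exact ⟨b, t, rfl⟩
      have hbne : b ≠ 0 := pvDrop_head_ne _ _ _ hbt
      have hlast : s.getLast? ≠ some 0 := by
        rw [hs, hbt, List.getLast?_reverse]
        simp [hbne]
      have hsle : ∀ z ∈ s, z ≤ 1 := by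
        intro z hz
        apply hbits
        rw [hs] at hz
        rw [List.mem_reverse] at hz
        have := (List.dropWhile_sublist (l := acc.reverse) (p := fun b => b == 0)).mem hz
        rwa [List.mem_reverse] at this
      have hpos : 1 ≤ pvVal s := pvLast_pos _ hse hlast
      rw [pvCanon s hsle hse hlast]
      unfold pvBinRepr
      rw [if_neg (by omega)]
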